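-- pv_equiv track=rewrite | github.com/IamTrollFace555/project-euler | PE_92.py | rec
-- ===== SOURCE A (Python) =====
-- def rec(a):
--     x=0
--     b= str(a)
--     for i in range(len(b)):
--         x=x+int(b[i])**2
--     if x==89:
--         return 89
--     elif x==1:
--         return 1
--     else:
--         return rec(x)
-- ===== SOURCE B (Python) =====
-- def rec(a):
--     v = a
--     while True:
--         s = 0
--         n = v
--         while n > 0:
--             d = n % 10
--             s += d * d
--             n //= 10
--         v = s
--         if v == 89:
--             return 89
--         if v == 1:
--             return 1
-- ===== Notes on version B (the rewrite author's own statement) =====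
-- stated objective: simpler
-- what changed: Replaced the tail recursion and per-call str()/int() digit extraction by an iterative while loop that extracts digits arithmetically with % 10 and // 10.
-- outside the precondition, e.g. on rec(0): A raises RecursionError, B does not finish within the time limit; on rec(-5): A raises ValueError, B does not finish within the time limit
import Mathlib
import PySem

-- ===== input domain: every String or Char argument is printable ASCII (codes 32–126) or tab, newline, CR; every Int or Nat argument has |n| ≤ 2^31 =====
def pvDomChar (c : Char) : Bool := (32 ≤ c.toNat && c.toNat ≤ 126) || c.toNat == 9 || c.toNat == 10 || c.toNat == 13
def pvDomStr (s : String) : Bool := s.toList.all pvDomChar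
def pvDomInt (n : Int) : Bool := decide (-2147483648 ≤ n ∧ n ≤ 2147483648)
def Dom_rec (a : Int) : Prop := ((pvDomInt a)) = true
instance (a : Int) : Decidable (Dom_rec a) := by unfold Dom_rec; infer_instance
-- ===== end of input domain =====

-- B replaces A's tail recursion with per-step str()/int() digit extraction by an
-- iterative loop extracting digits arithmetically (% 10, // 10).
-- Both ports use a fuel counter solely to make the recursion total;
-- on Pre_ inputs in Dom the fuel is never exhausted (chains are far shorter than 1000).

-- ===== PORT A =====
-- one recursive call of A, digit-square-sum via str(a): x += int(b[i])**2
-- (str(a) is ported as PySem.Int.toChars a, the char list of PySem.Int.toStr a;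
--  int(b[i]) is PySem.Int.ofChars? on the single char, defaulted to 0 where Python raises)
def recFuelA : Nat → Int → Int
  | 0, _ => 0
  | fuel + 1, a =>
    let b := PySem.Int.toChars a
    let x := (PySem.List.pyRange 0 (b.length : Int) 1).foldl
      (fun x i => x + ((PySem.Int.ofChars? [PySem.List.pyGetD b i ' ']).getD 0) ^ 2) 0
    if x = 89 then 89
    else if x = 1 then 1
    else recFuelA fuel x

def rec (a : Int) : Int := recFuelA 1000 a

-- ===== PORT B =====
-- inner while loop of B: digit-square-sum by n % 10 / n //= 10
theorem pv_div10_lt (n : Int) (h : 0 < n) : (PySem.Int.floordiv n 10).toNat < n.toNat := by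
  rw [PySem.Int.floordiv_eq_ediv_of_pos (by omega)]
  omega

def dssB (n : Int) (s : Int) : Int :=
  if h : 0 < n then
    dssB (PySem.Int.floordiv n 10) (s + (PySem.Int.mod n 10) * (PySem.Int.mod n 10))
  else s
  termination_by n.toNat
  decreasing_by exact pv_div10_lt n h

-- outer while True loop of B, with fuel for totality
def loopB : Nat → Int → Int
  | 0, _ => 0
  | fuel + 1, v =>
    let s := dssB v 0
    if s = 89 then 89
    else if s = 1 then 1
    else loopB fuel s

def rec_alt (a : Int) : Int := loopB 1000 a

-- ===== PRECONDITION & SPEC =====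
-- Pre_ excludes a ≤ 0: for negative a, A raises ValueError (int('-') on the sign
-- character) and for a = 0 the chain is stuck at 0, so A raises RecursionError;
-- A never returns a value on any excluded input.
def Pre_rec (a : Int) : Prop := 1 ≤ a
instance (a : Int) : Decidable (Pre_rec a) := by unfold Pre_rec; infer_instance
def pvWitness_rec : Int := (7)

def Spec_rec (a : Int) (out : Int) : Prop := out = rec_alt a
instance (a : Int) (out : Int) : Decidable (Spec_rec a out) := by unfold Spec_rec; infer_instance

-- ===== CLAIM (what is proved, stated in full; the proofs are below) =====
def Claim_equal_rec : Prop := ∀ (a : Int), Dom_rec a → Pre_rec a → Spec_rec a (rec a)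

-- ===== LEMMAS AND PROOFS =====

-- digit value of a single char as A computes it
def pvVal (c : Char) : Int := (PySem.Int.ofChars? [c]).getD 0

-- digit-square-sum of a Nat, most convenient shape for both sides
def pvD (m : Nat) : Int :=
  if h : 0 < m then pvD (m / 10) + ((m % 10 : Nat) : Int) ^ 2 else 0
  termination_by m
  decreasing_by exact Nat.div_lt_self h (by omega)

lemma pvD_nonneg (m : Nat) : 0 ≤ pvD m := by
  induction m using Nat.strong_induction_on with
  | _ m ih =>
    rw [pvD]
    split
    · have := ih (m / 10) (Nat.div_lt_self ‹0 < m› (by omega))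
      positivity
    · exact le_refl 0

lemma pvVal_digitChar (d : Nat) (h : d < 10) : pvVal (Nat.digitChar d) = (d : Int) := by
  interval_cases d <;> decide

-- B's inner loop computes pvD
lemma dssB_natCast (m : Nat) (s : Int) : dssB (m : Int) s = s + pvD m := by
  induction m using Nat.strong_induction_on generalizing s with
  | _ m ih =>
    rw [dssB, pvD]
    by_cases h : 0 < m
    · rw [dif_pos (by exact_mod_cast h), dif_pos h]
      have hf : PySem.Int.floordiv (m : Int) 10 = ((m / 10 : Nat) : Int) := by
        exact_mod_cast PySem.Int.floordiv_natCast m 10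
      have hm10 : PySem.Int.mod (m : Int) 10 = ((m % 10 : Nat) : Int) := by
        exact_mod_cast PySem.Int.mod_natCast m 10
      rw [hf, hm10]
      rw [ih (m / 10) (Nat.div_lt_self h (by omega))]
      ring
    · rw [dif_neg (by omega), dif_neg h]
      simp

-- accumulator lemma for Nat.toDigitsCore
lemma toDigitsCore_acc (fuel : Nat) : ∀ (n : Nat) (ds : List Char),
    Nat.toDigitsCore 10 fuel n ds = Nat.toDigitsCore 10 fuel n [] ++ ds := by
  induction fuel with
  | zero => intro n ds; simp [Nat.toDigitsCore]
  | succ f ih =>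
    intro n ds
    simp only [Nat.toDigitsCore]
    by_cases h : n / 10 = 0
    · simp [h]
    · simp only [if_neg h]
      rw [ih (n / 10) ((n % 10).digitChar :: ds), ih (n / 10) [(n % 10).digitChar]]
      simp

-- sum of squared digit values over toDigitsCore equals pvD
lemma toDigitsCore_sum (fuel : Nat) : ∀ (m : Nat), m < fuel →
    ((Nat.toDigitsCore 10 fuel m []).map (fun c => pvVal c ^ 2)).sum = pvD m := by
  induction fuel with
  | zero => intro m h; omega
  | succ f ih =>
    intro m hm
    simp only [Nat.toDigitsCore]
    by_cases h : m / 10 = 0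
    · have hlt : m % 10 = m := by omega
      simp only [if_pos h, List.map_cons, List.map_nil, List.sum_cons, List.sum_nil]
      rw [pvVal_digitChar (m % 10) (Nat.mod_lt m (by omega))]
      rw [pvD]
      by_cases h0 : 0 < m
      · rw [dif_pos h0, pvD, dif_neg (by omega)]
        simp [hlt]
      · have : m = 0 := by omega
        subst this
        simp
    · simp only [if_neg h]
      rw [toDigitsCore_acc, List.map_append, List.sum_append]
      have hdiv : m / 10 < f := by
        have h1 : m / 10 < m := Nat.div_lt_self (by omega) (by omega)
        omega
      rw [ih (m / 10) hdiv]
      simp only [List.map_cons, List.map_nil, List.sum_cons, List.sum_nil]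
      rw [pvVal_digitChar (m % 10) (Nat.mod_lt m (by omega))]
      conv_rhs => rw [pvD]
      rw [dif_pos (by omega)]
      ring

-- A's digit-square-sum of a nonnegative Int equals pvD
lemma dssA_eq (m : Nat) :
    ((PySem.List.pyRange 0 ((PySem.Int.toChars (m : Int)).length : Int) 1).foldl
      (fun x i => x + ((PySem.Int.ofChars? [PySem.List.pyGetD (PySem.Int.toChars (m : Int)) i ' ']).getD 0) ^ 2) 0)
    = pvD m := by
  rw [PySem.List.foldl_pyRange_zero_pyGetD' (PySem.Int.toChars (m : Int)) ' '
      (fun x c => x + ((PySem.Int.ofChars? [c]).getD 0) ^ 2) 0]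
  have htc : PySem.Int.toChars (m : Int) = Nat.toDigits 10 m := by
    simp [PySem.Int.toChars]
  rw [htc]
  have : ∀ (l : List Char) (x : Int),
      l.foldl (fun x c => x + ((PySem.Int.ofChars? [c]).getD 0) ^ 2) x
        = x + (l.map (fun c => pvVal c ^ 2)).sum := by
    intro l
    induction l with
    | nil => intro x; simp
    | cons c t iht =>
      intro x
      simp only [List.foldl_cons, List.map_cons, List.sum_cons, iht]
      simp [pvVal]
      ring
  rw [this]
  rw [Nat.toDigits, toDigitsCore_sum (m + 1) m (by omega)]
  simp

-- main equality, by induction on the shared fuel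
lemma fuel_eq (fuel : Nat) : ∀ (v : Int), 0 ≤ v → recFuelA fuel v = loopB fuel v := by
  induction fuel with
  | zero => intro v _; rfl
  | succ f ih =>
    intro v hv
    obtain ⟨m, rfl⟩ : ∃ m : Nat, v = (m : Int) := ⟨v.toNat, by omega⟩
    show (let b := PySem.Int.toChars (m : Int);
      let x := (PySem.List.pyRange 0 (b.length : Int) 1).foldl
        (fun x i => x + ((PySem.Int.ofChars? [PySem.List.pyGetD b i ' ']).getD 0) ^ 2) 0;
      if x = 89 then 89 else if x = 1 then 1 else recFuelA f x)
      = (let s := dssB (m : Int) 0;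
         if s = 89 then 89 else if s = 1 then 1 else loopB f s)
    simp only [dssA_eq m, dssB_natCast m 0, zero_add]
    by_cases h89 : pvD m = 89
    · simp [h89]
    · by_cases h1 : pvD m = 1
      · simp [h1]
      · simp only [if_neg h89, if_neg h1]
        exact ih (pvD m) (pvD_nonneg m)

-- ===== VERDICT (by name: the statement is the Claim_ definition above) =====
theorem rec_spec : Claim_equal_rec := by
  intro a _ hpre
  unfold Spec_rec rec rec_alt
  exact fuel_eq 1000 a (by exact le_trans (by omega) hpre)
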